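-- pv_equiv track=rewrite | github.com/Knoekus/Carcassonne_online | files_lib/tile_data.py | add_corner
-- ===== SOURCE A (Python) =====
-- data_steps = 7
--
-- def make_row(pairs, num_rows:int=1):
--     '''
--     pairs : tuple (mat_idx, reps)
--         Contains the mat_idx and number of repetitions to make a material data row.
--
--     num_rows : int (default = 1)
--         How many times should this row be repeated?'''
--
--     # Check
--     if type(pairs) == tuple:
--         pairs = [pairs]
--     elif type(pairs) != list:
--         raise Exception('pairs must be of type list or tuple.')
--
--     # Make row
--     row = list()
--     for mat_idx, reps in pairs:
--         row += [mat_idx for x in range(reps)]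
--
--     # Return
--     if num_rows == 1:
--         return row
--     else:
--         return [row for x in range(num_rows)]
--
-- def add_corner(pos, mat_idx, data=None):
--     data_new = [[0 for col in range(data_steps)] for row in range(data_steps)]
--     if pos == 'NE':
--         data_new[:2] = make_row([(0, 3), (mat_idx, 1), (0, 3)], 2)
--         data_new[2] = make_row([(0, 3), (mat_idx, 2), (0, 2)])
--         data_new[3] = make_row([(0, 3), (mat_idx, 4)])
--     elif pos == 'SE':
--         data_new[3] = make_row([(0, 3), (mat_idx, 4)])
--         data_new[4] = make_row([(0, 3), (mat_idx, 2), (0, 2)])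
--         data_new[5:] = make_row([(0, 3), (mat_idx, 1), (0, 3)], 2)
--     elif pos == 'SW':
--         data_new[3] = make_row([(mat_idx, 4), (0, 3)])
--         data_new[4] = make_row([(0, 2), (mat_idx, 2), (0, 3)])
--         data_new[5:] = make_row([(0, 3), (mat_idx, 1), (0, 3)], 2)
--     elif pos == 'NW':
--         data_new[:2] = make_row([(0, 3), (mat_idx, 1), (0, 3)], 2)
--         data_new[2] = make_row([(0, 2), (mat_idx, 2), (0, 3)])
--         data_new[3] = make_row([(mat_idx, 4), (0, 3)])
--
--     if data == None:
--         return data_new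
--     else:
--         # Combine data
--         for row_idx in range(len(data)):
--             data[row_idx] = [data[row_idx][x]+data_new[row_idx][x] for x in range(len(data))]
--         return data
-- ===== SOURCE B (Python) =====
-- # Coordinate-driven rebuild: per-orientation list of (row, col) cells set to mat_idx,
-- # instead of make_row slice-assignments; combine via zip. Mutates `data` in place like A.
-- data_steps = 7
--
-- def add_corner(pos, mat_idx, data=None):
--     coords = {
--         'NE': [(0, 3), (1, 3), (2, 3), (2, 4), (3, 3), (3, 4), (3, 5), (3, 6)],
--         'SE': [(3, 3), (3, 4), (3, 5), (3, 6), (4, 3), (4, 4), (5, 3), (6, 3)],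
--         'SW': [(3, 0), (3, 1), (3, 2), (3, 3), (4, 2), (4, 3), (5, 3), (6, 3)],
--         'NW': [(0, 3), (1, 3), (2, 2), (2, 3), (3, 0), (3, 1), (3, 2), (3, 3)],
--     }
--     data_new = [[0] * data_steps for _ in range(data_steps)]
--     for r, c in coords.get(pos, []):
--         data_new[r][c] = mat_idx
--     if data is None:
--         return data_new
--     n = len(data)
--     for i in range(n):
--         data[i] = [a + b for a, b in zip(data[i][:n], data_new[i])]
--     return data
-- ===== Notes on version B (the rewrite author's own statement) =====
-- stated objective: simpler
-- what changed: Replaces make_row slice-assignments by a per-orientation coordinate list written into a zero grid, and the combine inner index loop by a zip of the sliced row with the new row; equivalence is about the return value (both mutate data in place).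
import Mathlib
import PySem

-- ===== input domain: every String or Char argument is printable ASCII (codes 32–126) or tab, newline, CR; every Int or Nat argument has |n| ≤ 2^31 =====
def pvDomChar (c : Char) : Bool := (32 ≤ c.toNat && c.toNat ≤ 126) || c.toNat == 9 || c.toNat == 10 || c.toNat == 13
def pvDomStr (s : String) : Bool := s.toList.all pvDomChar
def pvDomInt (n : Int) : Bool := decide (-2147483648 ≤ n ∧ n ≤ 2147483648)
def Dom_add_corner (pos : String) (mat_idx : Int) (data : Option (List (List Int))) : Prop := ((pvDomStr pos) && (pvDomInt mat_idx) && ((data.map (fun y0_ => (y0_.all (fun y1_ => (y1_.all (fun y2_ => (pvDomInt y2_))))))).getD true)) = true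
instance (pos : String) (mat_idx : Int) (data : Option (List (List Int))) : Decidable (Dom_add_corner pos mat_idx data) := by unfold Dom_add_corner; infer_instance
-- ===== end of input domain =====

-- B rebuilds the 7x7 grid from a per-orientation coordinate list instead of make_row
-- slice-assignments, and combines rows via zip; return values agree on Pre_ (both Pythons
-- mutate `data` in place; the equivalence proved here is about the return value).

-- ===== PORT A =====
-- make_row (always called with a list of pairs here; num_rows=2 case inlined as [row, row])
def makeRowA (pairs : List (Int × Int)) : List Int :=
  pairs.foldl (fun row p => row ++ (List.range p.2.toNat).map (fun _ => p.1)) []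

-- data_new construction of A: zero grid, then the four slice/index assignments per branch
def gridA (pos : String) (mat_idx : Int) : List (List Int) :=
  let z := (List.range 7).map (fun _ => (List.range 7).map (fun _ => (0 : Int)))
  if pos = "NE" then
    let r01 := makeRowA [(0, 3), (mat_idx, 1), (0, 3)]
    let dn := [r01, r01] ++ z.drop 2
    let dn := dn.set 2 (makeRowA [(0, 3), (mat_idx, 2), (0, 2)])
    dn.set 3 (makeRowA [(0, 3), (mat_idx, 4)])
  else if pos = "SE" then
    let dn := z.set 3 (makeRowA [(0, 3), (mat_idx, 4)])
    let dn := dn.set 4 (makeRowA [(0, 3), (mat_idx, 2), (0, 2)])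
    let r56 := makeRowA [(0, 3), (mat_idx, 1), (0, 3)]
    dn.take 5 ++ [r56, r56]
  else if pos = "SW" then
    let dn := z.set 3 (makeRowA [(mat_idx, 4), (0, 3)])
    let dn := dn.set 4 (makeRowA [(0, 2), (mat_idx, 2), (0, 3)])
    let r56 := makeRowA [(0, 3), (mat_idx, 1), (0, 3)]
    dn.take 5 ++ [r56, r56]
  else if pos = "NW" then
    let r01 := makeRowA [(0, 3), (mat_idx, 1), (0, 3)]
    let dn := [r01, r01] ++ z.drop 2
    let dn := dn.set 2 (makeRowA [(0, 2), (mat_idx, 2), (0, 3)])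
    dn.set 3 (makeRowA [(mat_idx, 4), (0, 3)])
  else z

def add_corner (pos : String) (mat_idx : Int) (data : Option (List (List Int))) : List (List Int) :=
  let data_new := gridA pos mat_idx
  match data with
  | none => data_new
  | some d =>
    -- for row_idx in range(len(data)): data[row_idx] = [data[row_idx][x]+data_new[row_idx][x] for x in range(len(data))]
    -- (indexing is in range on Pre_; getD is exact there)
    (List.range d.length).foldl
      (fun acc i =>
        acc.set i ((List.range d.length).map
          (fun x => (acc.getD i []).getD x 0 + (data_new.getD i []).getD x 0))) d

-- ===== PORT B =====
def cornerCoords (pos : String) : List (Nat × Nat) :=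
  if pos = "NE" then [(0, 3), (1, 3), (2, 3), (2, 4), (3, 3), (3, 4), (3, 5), (3, 6)]
  else if pos = "SE" then [(3, 3), (3, 4), (3, 5), (3, 6), (4, 3), (4, 4), (5, 3), (6, 3)]
  else if pos = "SW" then [(3, 0), (3, 1), (3, 2), (3, 3), (4, 2), (4, 3), (5, 3), (6, 3)]
  else if pos = "NW" then [(0, 3), (1, 3), (2, 2), (2, 3), (3, 0), (3, 1), (3, 2), (3, 3)]
  else []

def gridB (pos : String) (mat_idx : Int) : List (List Int) :=
  (cornerCoords pos).foldl
    (fun g rc => g.set rc.1 ((g.getD rc.1 []).set rc.2 mat_idx))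
    (List.replicate 7 (List.replicate 7 (0 : Int)))

def add_corner_alt (pos : String) (mat_idx : Int) (data : Option (List (List Int))) : List (List Int) :=
  let data_new := gridB pos mat_idx
  match data with
  | none => data_new
  | some d =>
    let n := d.length
    (List.range n).foldl
      (fun acc i =>
        acc.set i (List.zipWith (· + ·) ((acc.getD i []).take n) (data_new.getD i []))) d

-- ===== PRECONDITION & SPEC =====
-- Pre_ excludes exactly the inputs where A raises IndexError in the combine loop:
-- a data list longer than 7 rows, or containing a row shorter than len(data).
def Pre_add_corner (pos : String) (mat_idx : Int) (data : Option (List (List Int))) : Prop :=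
  (data.getD []).length ≤ 7 ∧ ∀ row ∈ data.getD [], (data.getD []).length ≤ row.length
instance (pos : String) (mat_idx : Int) (data : Option (List (List Int))) : Decidable (Pre_add_corner pos mat_idx data) := by unfold Pre_add_corner; infer_instance

def pvWitness_add_corner : String × Int × Option (List (List Int)) :=
  ("NE", 5, some [[1, 2, 3], [4, 5, 6], [7, 8, 9]])

def Spec_add_corner (pos : String) (mat_idx : Int) (data : Option (List (List Int))) (out : List (List Int)) : Prop := out = add_corner_alt pos mat_idx data
instance (pos : String) (mat_idx : Int) (data : Option (List (List Int))) (out : List (List Int)) : Decidable (Spec_add_corner pos mat_idx data out) := by unfold Spec_add_corner; infer_instance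

-- ===== CLAIM (what is proved, stated in full; the proofs are below) =====
def Claim_equal_add_corner : Prop := ∀ (pos : String) (mat_idx : Int) (data : Option (List (List Int))), Dom_add_corner pos mat_idx data → Pre_add_corner pos mat_idx data → Spec_add_corner pos mat_idx data (add_corner pos mat_idx data)

-- ===== LEMMAS AND PROOFS =====

-- the two grid constructions agree for every pos and mat_idx
theorem gridA_eq_gridB (pos : String) (mat_idx : Int) : gridA pos mat_idx = gridB pos mat_idx := by
  unfold gridA gridB cornerCoords makeRowA
  split_ifs <;> rfl

theorem gridA_row_len (pos : String) (mat_idx : Int) (j : Nat) (hj : j < 7) :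
    ((gridA pos mat_idx).getD j []).length = 7 := by
  unfold gridA makeRowA
  split_ifs <;> interval_cases j <;> rfl

theorem getD_set_eq (l : List (List Int)) (i j : Nat) (r : List Int) :
    (l.set i r).getD j [] = if i = j ∧ j < l.length then r else l.getD j [] := by
  simp only [List.getD, List.getElem?_set]
  by_cases h : i = j
  · subst h
    by_cases hl : i < l.length <;> simp [hl]
  · simp [h]

theorem row_eq (n : Nat) (r s : List Int) (hr : n ≤ r.length) (hs : n ≤ s.length) :
    (List.range n).map (fun x => r.getD x 0 + s.getD x 0) = List.zipWith (· + ·) (r.take n) s := by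
  apply List.ext_getElem
  · simp; omega
  · intro i h1 h2
    have hi : i < n := by simpa using h1
    simp [List.getD_eq_getElem?_getD, List.getElem?_eq_getElem (by omega : i < r.length),
      List.getElem?_eq_getElem (by omega : i < s.length)]

theorem fold_eq (dnl : List (List Int)) (n : Nat) (hn : n ≤ 7)
    (hdn : ∀ j, j < 7 → ((dnl.getD j []).length = 7)) :
    ∀ (l : List Nat) (acc : List (List Int)), (∀ i ∈ l, i < n) → acc.length = n →
    (∀ j, j < acc.length → n ≤ (acc.getD j []).length) →
    l.foldl (fun acc i =>
        acc.set i ((List.range n).map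
          (fun x => (acc.getD i []).getD x 0 + (dnl.getD i []).getD x 0))) acc
    = l.foldl (fun acc i =>
        acc.set i (List.zipWith (· + ·) ((acc.getD i []).take n) (dnl.getD i []))) acc := by
  intro l
  induction l with
  | nil => intro acc _ _ _; rfl
  | cons i t ih =>
    intro acc hmem hlen hrows
    have hi : i < n := hmem i (List.mem_cons_self ..)
    have hrow : (List.range n).map
        (fun x => (acc.getD i []).getD x 0 + (dnl.getD i []).getD x 0)
        = List.zipWith (· + ·) ((acc.getD i []).take n) (dnl.getD i []) := by
      apply row_eq
      · exact hrows i (by omega)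
      · rw [hdn i (by omega)]; exact hn
    have hri : n ≤ (acc.getD i []).length := hrows i (by omega)
    simp only [List.foldl_cons, hrow]
    apply ih
    · exact fun j hj => hmem j (List.mem_cons_of_mem _ hj)
    · simpa using hlen
    · intro j hj
      rw [getD_set_eq]
      split_ifs with h
      · rw [List.length_zipWith, List.length_take, hdn i (by omega)]
        omega
      · exact hrows j (by rwa [List.length_set] at hj)

-- ===== VERDICT (by name: the statement is the Claim_ definition above) =====
theorem add_corner_spec : Claim_equal_add_corner := by
  intro pos mat_idx data _ hpre
  unfold Spec_add_corner add_corner add_corner_alt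
  rw [← gridA_eq_gridB]
  cases data with
  | none => rfl
  | some d =>
    obtain ⟨h7, hrows⟩ := hpre
    exact fold_eq (gridA pos mat_idx) d.length h7 (gridA_row_len pos mat_idx)
      (List.range d.length) d (fun i hi => List.mem_range.mp hi) rfl
      (fun j hj => by
        rw [List.getD_eq_getElem d [] hj]
        exact hrows _ (List.getElem_mem hj))
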